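-- pv_equiv track=rewrite | github.com/sandyz1000/algo_LC_GFG | sequence/rearrangement/maxlength_bitionic_subarray.py | maxLenBitonic
-- ===== SOURCE A (Python) =====
-- def maxLenBitonic(A, n):
--     """ Maximum Length Bitonic Subarray | Set 2 (O(n) time and O(1) Space) """
--     if n == 0:  # if A is empty
--         return 0
--
--     #  initializing max_len
--     maxLen = 1
--     start = 0
--     nextStart = 0
--     j = 0
--
--     while j < n - 1:
--         #  look for end of ascent
--         while j < n - 1 and A[j] <= A[j + 1]:
--             j += 1
--
--         #  look for end of descent
--         while j < n - 1 and A[j] >= A[j + 1]: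
--             # adjusting nextStart this will be necessarily executed at least once, when we detect
--             # the start of the descent
--             if j < n - 1 and A[j] > A[j + 1]:
--                 nextStart = j + 1
--             j += 1
--
--         #  updating maxLen, if required
--         maxLen = max(maxLen, j - (start - 1))
--         start = nextStart
--     return maxLen
-- ===== SOURCE B (Python) =====
-- def maxLenBitonic(A, n):
--     """Longest bitonic subarray via inc/dec run-length arrays (two-pass DP)."""
--     if n == 0:
--         return 0
--
--     def runs(xs):
--         # r[i] = length of the longest non-decreasing run of xs ending at i
--         r = [1]
--         for i in range(1, len(xs)):
--             r.append(r[-1] + 1 if xs[i - 1] <= xs[i] else 1)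
--         return r
--
--     xs = A[:n]
--     inc = runs(xs)                   # non-decreasing run ending at i
--     dec = runs(xs[::-1])[::-1]       # non-increasing run starting at i
--     best = 1
--     for i in range(n):
--         best = max(best, inc[i] + dec[i] - 1)
--     return best
-- ===== Notes on version B (the rewrite author's own statement) =====
-- stated objective: alternative
-- what changed: Replaces A's interleaved O(1)-space two-pointer scan (ascend, descend, retract the next start) by the standard two-pass DP: build inc[i] (non-decreasing run ending at i) and dec[i] (non-increasing run starting at i, via runs of the reversed prefix) and take max_i inc[i]+dec[i]-1.
-- outside the precondition, e.g. on maxLenBitonic([], 1): A returns 1, B returns 1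
import Mathlib
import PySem

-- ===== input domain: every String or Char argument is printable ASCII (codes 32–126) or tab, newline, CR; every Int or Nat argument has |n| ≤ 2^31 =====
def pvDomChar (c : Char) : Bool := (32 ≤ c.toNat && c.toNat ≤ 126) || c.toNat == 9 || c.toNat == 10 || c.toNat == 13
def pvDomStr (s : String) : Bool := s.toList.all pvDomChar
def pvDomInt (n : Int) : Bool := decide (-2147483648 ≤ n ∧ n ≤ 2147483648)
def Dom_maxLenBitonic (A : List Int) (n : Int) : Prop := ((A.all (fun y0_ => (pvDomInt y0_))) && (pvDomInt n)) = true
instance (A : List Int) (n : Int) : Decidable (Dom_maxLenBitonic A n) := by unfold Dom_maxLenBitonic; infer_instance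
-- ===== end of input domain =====

-- B replaces A's interleaved O(1)-space two-pointer scan by the standard two-pass inc/dec
-- run-length DP (objective: alternative; same O(n) time).

-- ===== PORT A =====
-- Each `while` loop is ported as structural recursion on a fuel argument; fuel n.toNat is a
-- pure totality guard (it bounds every loop of A, which advances j past n-1 within n steps)
-- and changes nothing else.

-- inner `while j < n - 1 and A[j] <= A[j + 1]: j += 1`
def ascA (A : List Int) (n : Int) : Nat → Int → Int
  | 0, j => j
  | fuel + 1, j =>
    if j < n - 1 ∧ PySem.List.pyGetD A j 0 ≤ PySem.List.pyGetD A (j + 1) 0 then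
      ascA A n fuel (j + 1)
    else j

-- inner `while j < n - 1 and A[j] >= A[j + 1]: if …: nextStart = j + 1; j += 1`
def descA (A : List Int) (n : Int) : Nat → Int → Int → Int × Int
  | 0, j, ns => (j, ns)
  | fuel + 1, j, ns =>
    if j < n - 1 ∧ PySem.List.pyGetD A (j + 1) 0 ≤ PySem.List.pyGetD A j 0 then
      descA A n fuel (j + 1)
        (if j < n - 1 ∧ PySem.List.pyGetD A (j + 1) 0 < PySem.List.pyGetD A j 0 then j + 1 else ns)
    else (j, ns)

-- outer `while j < n - 1:` loop of A
def outerA (A : List Int) (n : Int) : Nat → Int → Int → Int → Int → Int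
  | 0, _, _, _, maxLen => maxLen
  | fuel + 1, j, start, ns, maxLen =>
    if j < n - 1 then
      outerA A n fuel (descA A n n.toNat (ascA A n n.toNat j) ns).1
        (descA A n n.toNat (ascA A n n.toNat j) ns).2 (descA A n n.toNat (ascA A n n.toNat j) ns).2
        (max maxLen ((descA A n n.toNat (ascA A n n.toNat j) ns).1 - (start - 1)))
    else maxLen

def maxLenBitonic (A : List Int) (n : Int) : Int :=
  if n = 0 then 0 else outerA A n n.toNat 0 0 0 1

-- ===== PORT B =====
-- helper `runs(xs)`: r[i] = length of the longest non-decreasing run of xs ending at i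
def runsB (xs : List Int) : List Int :=
  (PySem.List.pyRange 1 (xs.length : Int) 1).foldl
    (fun r i =>
      r ++ [if PySem.List.pyGetD xs (i - 1) 0 ≤ PySem.List.pyGetD xs i 0 then
              PySem.List.pyGetD r (-1) 0 + 1 else 1])
    [1]

def maxLenBitonic_alt (A : List Int) (n : Int) : Int :=
  if n = 0 then 0 else
    (PySem.List.pyRange 0 n 1).foldl
      (fun best i =>
        max best (PySem.List.pyGetD (runsB (PySem.List.slice A none (some n))) i 0 +
          PySem.List.pyGetD ((runsB (PySem.List.slice A none (some n)).reverse).reverse) i 0 - 1)) 1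

-- ===== PRECONDITION & SPEC =====
-- Pre_ excludes only n > len(A), where A (and B) raise IndexError on every input except
-- A = [] with n = 1, on which both still return 1.
def Pre_maxLenBitonic (A : List Int) (n : Int) : Prop := n ≤ (A.length : Int)
instance (A : List Int) (n : Int) : Decidable (Pre_maxLenBitonic A n) := by
  unfold Pre_maxLenBitonic; infer_instance

def pvWitness_maxLenBitonic : List Int × Int := ([1, 3, 2], 3)

def Spec_maxLenBitonic (A : List Int) (n : Int) (out : Int) : Prop := out = maxLenBitonic_alt A n
instance (A : List Int) (n : Int) (out : Int) : Decidable (Spec_maxLenBitonic A n out) := by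
  unfold Spec_maxLenBitonic; infer_instance

-- ===== CLAIM (what is proved, stated in full; the proofs are below) =====
def Claim_equal_maxLenBitonic : Prop :=
  ∀ (A : List Int) (n : Int), Dom_maxLenBitonic A n → Pre_maxLenBitonic A n →
    Spec_maxLenBitonic A n (maxLenBitonic A n)

-- ===== LEMMAS AND PROOFS =====

-- reference functions: pvG = 0-defaulted indexing, incF/decF = run lengths, bestUpTo = running max
def pvG (xs : List Int) (i : Nat) : Int := xs.getD i 0

def incF (xs : List Int) : Nat → Int
  | 0 => 1
  | i + 1 => if pvG xs i ≤ pvG xs (i + 1) then incF xs i + 1 else 1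

def decF (xs : List Int) (m i : Nat) : Int :=
  if h : i + 1 < m ∧ pvG xs (i + 1) ≤ pvG xs i then decF xs m (i + 1) + 1 else 1
termination_by m - i
decreasing_by omega

def pvF (xs : List Int) (m i : Nat) : Int := incF xs i + decF xs m i - 1

def bestUpTo (xs : List Int) (m k : Nat) : Int :=
  (List.range k).foldl (fun b i => max b (pvF xs m i)) 1

theorem pyGetD_nat (A : List Int) (j : Nat) : PySem.List.pyGetD A (j : Int) 0 = pvG A j := by
  simp [pvG, PySem.List.pyGetD_natCast]

theorem incF_pos (xs : List Int) (i : Nat) : 1 ≤ incF xs i := by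
  induction i with
  | zero => simp [incF]
  | succ i ih => rw [incF]; split <;> omega

theorem decF_pos (xs : List Int) (m i : Nat) : 1 ≤ decF xs m i := by
  by_cases h : i + 1 < m ∧ pvG xs (i + 1) ≤ pvG xs i
  · rw [decF, dif_pos h]
    have := decF_pos xs m (i + 1)
    omega
  · rw [decF, dif_neg h]
termination_by m - i
decreasing_by omega

theorem incF_succ_le (xs : List Int) (i : Nat) : incF xs (i + 1) ≤ incF xs i + 1 := by
  rw [incF]; split
  · omega
  · have := incF_pos xs i; omega

theorem incF_sub_le (xs : List Int) {i k : Nat} (h : i ≤ k) :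
    incF xs k ≤ incF xs i + ((k : Int) - (i : Int)) := by
  induction k with
  | zero =>
    have : i = 0 := by omega
    subst this; simp
  | succ k ih =>
    rcases Nat.lt_or_ge i (k + 1) with hlt | hge
    · have h1 := ih (by omega)
      have h2 := incF_succ_le xs k
      push_cast
      push_cast at h1
      omega
    · have : i = k + 1 := by omega
      subst this; simp

theorem incF_eq (xs : List Int) {s k : Nat} (hs : s = 0 ∨ pvG xs s < pvG xs (s - 1))
    (hasc : ∀ i, s ≤ i → i < k → pvG xs i ≤ pvG xs (i + 1)) (hsk : s ≤ k) :
    incF xs k = (k : Int) - (s : Int) + 1 := by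
  induction k with
  | zero =>
    have : s = 0 := by omega
    subst this; simp [incF]
  | succ k ih =>
    by_cases hsk' : s = k + 1
    · subst hsk'
      rcases hs with h0 | hlt
      · omega
      · rw [incF, if_neg (by simp only [Nat.add_sub_cancel] at hlt; omega)]
        push_cast; ring
    · have h1 : s ≤ k := by omega
      rw [incF, if_pos (hasc k h1 (by omega)), ih (fun i hi hik => hasc i hi (by omega)) h1]
      push_cast; ring

theorem incF_imp_asc (xs : List Int) {s k : Nat} (h : incF xs k = (k : Int) - (s : Int) + 1)
    (_hsk : s ≤ k) : ∀ i, s ≤ i → i < k → pvG xs i ≤ pvG xs (i + 1) := by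
  intro i hi hik
  have h1 : incF xs k ≤ incF xs (i + 1) + ((k : Int) - ((i + 1 : Nat) : Int)) :=
    incF_sub_le xs (by omega)
  by_contra hx
  have h2 : incF xs (i + 1) = 1 := by rw [incF, if_neg hx]
  rw [h2] at h1
  push_cast at h1
  omega

theorem decF_eq (xs : List Int) {m j k : Nat} (hjk : j ≤ k) (hkm : k + 1 ≤ m)
    (hdesc : ∀ i, j ≤ i → i < k → pvG xs (i + 1) ≤ pvG xs i)
    (hstop : k + 1 = m ∨ pvG xs k < pvG xs (k + 1)) :
    decF xs m j = (k : Int) - (j : Int) + 1 := by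
  by_cases hjk' : j = k
  · subst hjk'
    rw [decF, dif_neg (by
      rintro ⟨hc1, hc2⟩
      rcases hstop with h | h
      · omega
      · omega)]
    ring
  · have hj : j < k := lt_of_le_of_ne hjk hjk'
    rw [decF, dif_pos ⟨by omega, hdesc j le_rfl hj⟩,
      decF_eq xs (by omega : j + 1 ≤ k) hkm (fun i hi hik => hdesc i (by omega) hik) hstop]
    push_cast; ring
termination_by k - j
decreasing_by omega

theorem runEnd_mono (xs : List Int) (m : Nat) {i k : Nat} (hik : i ≤ k)
    (hasc : ∀ t, i ≤ t → t < k → pvG xs t ≤ pvG xs (t + 1)) :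
    (i : Int) + decF xs m i ≤ (k : Int) + decF xs m k := by
  induction k with
  | zero =>
    have : i = 0 := by omega
    subst this; simp
  | succ k ih =>
    by_cases hik' : i = k + 1
    · subst hik'; simp
    · have h1 : i ≤ k := by omega
      have h2 : (i : Int) + decF xs m i ≤ (k : Int) + decF xs m k :=
        ih h1 (fun t ht htk => hasc t ht (by omega))
      have h3 : (k : Int) + decF xs m k ≤ ((k + 1 : Nat) : Int) + decF xs m (k + 1) := by
        by_cases hc : k + 1 < m ∧ pvG xs (k + 1) ≤ pvG xs k
        · conv_lhs => rw [decF, dif_pos hc]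
          push_cast; omega
        · conv_lhs => rw [decF, dif_neg hc]
          have := decF_pos xs m (k + 1)
          push_cast; omega
      omega

theorem best_succ (xs : List Int) (m k : Nat) :
    bestUpTo xs m (k + 1) = max (bestUpTo xs m k) (pvF xs m k) := by
  unfold bestUpTo
  rw [List.range_succ, List.foldl_append]
  simp

theorem best_mono (xs : List Int) (m : Nat) {j k : Nat} (h : j ≤ k) :
    bestUpTo xs m j ≤ bestUpTo xs m k := by
  induction k with
  | zero => simp_all
  | succ k ih =>
    by_cases hjk : j = k + 1
    · subst hjk; exact le_rfl
    · exact le_trans (ih (by omega)) (by rw [best_succ]; exact le_max_left _ _)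

theorem le_best (xs : List Int) (m : Nat) {i k : Nat} (h : i < k) :
    pvF xs m i ≤ bestUpTo xs m k := by
  induction k with
  | zero => omega
  | succ k ih =>
    rw [best_succ]
    by_cases hik : i = k
    · subst hik; exact le_max_right _ _
    · exact le_trans (ih (by omega)) (le_max_left _ _)

theorem best_le (xs : List Int) (m : Nat) {j k : Nat} (u : Int)
    (h : ∀ i, j ≤ i → i < k → pvF xs m i ≤ u) (hjk : j ≤ k) :
    bestUpTo xs m k ≤ max (bestUpTo xs m j) u := by
  induction k with
  | zero =>
    have : j = 0 := by omega
    subst this; exact le_max_left _ _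
  | succ k ih =>
    by_cases hjk' : j = k + 1
    · subst hjk'; exact le_max_left _ _
    · rw [best_succ]
      have h1 := ih (fun i hi hik => h i hi (by omega)) (by omega)
      have h2 := h k (by omega) (by omega)
      calc max (bestUpTo xs m k) (pvF xs m k) ≤ max (max (bestUpTo xs m j) u) u :=
            max_le_max h1 h2
        _ = max (bestUpTo xs m j) u := by rw [max_assoc, max_self]

theorem best_extend (xs : List Int) (m : Nat) {j k i0 : Nat} (u : Int)
    (hji0 : j ≤ i0) (hi0k : i0 < k) (hu : pvF xs m i0 = u)
    (h : ∀ i, j ≤ i → i < k → pvF xs m i ≤ u) :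
    bestUpTo xs m k = max (bestUpTo xs m j) u := by
  refine le_antisymm (best_le xs m u h (by omega)) (max_le (best_mono xs m (by omega)) ?_)
  rw [← hu]; exact le_best xs m hi0k

theorem asc_spec (A : List Int) (n : Int) (m : Nat) (hn : n = (m : Int)) (fuel j : Nat)
    (hj : j + 1 ≤ m) (hfuel : m - 1 - j ≤ fuel) :
    ∃ k : Nat, ascA A n fuel (j : Int) = (k : Int) ∧ j ≤ k ∧ k + 1 ≤ m ∧
      (∀ i, j ≤ i → i < k → pvG A i ≤ pvG A (i + 1)) ∧
      (k + 1 < m → pvG A (k + 1) < pvG A k) := by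
  induction fuel generalizing j with
  | zero =>
    exact ⟨j, rfl, le_rfl, hj, fun i hi hik => by omega, fun hlt => by omega⟩
  | succ fuel ih =>
    have hcast : ((j : Int) + 1) = ((j + 1 : Nat) : Int) := by push_cast; ring
    by_cases hc : j + 2 ≤ m ∧ pvG A j ≤ pvG A (j + 1)
    · have hcond : (j : Int) < n - 1 ∧
          PySem.List.pyGetD A (j : Int) 0 ≤ PySem.List.pyGetD A ((j : Int) + 1) 0 := by
        refine ⟨by omega, ?_⟩
        rw [hcast, pyGetD_nat, pyGetD_nat]
        exact hc.2
      rw [ascA, if_pos hcond, hcast]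
      obtain ⟨k, hk, h1, h2, h3, h4⟩ := ih (j + 1) (by omega) (by omega)
      refine ⟨k, hk, by omega, h2, ?_, h4⟩
      intro i hi hik
      rcases Nat.eq_or_lt_of_le hi with hij | hij
      · subst hij; exact hc.2
      · exact h3 i (by omega) hik
    · have hcond : ¬ ((j : Int) < n - 1 ∧
          PySem.List.pyGetD A (j : Int) 0 ≤ PySem.List.pyGetD A ((j : Int) + 1) 0) := by
        rintro ⟨hc1, hc2⟩
        rw [hcast, pyGetD_nat, pyGetD_nat] at hc2
        exact hc ⟨by omega, hc2⟩
      rw [ascA, if_neg hcond]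
      refine ⟨j, rfl, le_rfl, hj, fun i hi hik => by omega, fun hjm => ?_⟩
      by_contra hx
      exact hc ⟨by omega, by omega⟩

theorem desc_go (A : List Int) (n : Int) (m : Nat) (hn : n = (m : Int)) (fuel j ns : Nat)
    (hj : j + 1 ≤ m) (hfuel : m - 1 - j ≤ fuel)
    (hns1 : 1 ≤ ns) (hns2 : ns ≤ j) (hdrop : pvG A ns < pvG A (ns - 1))
    (heq : ∀ i, ns ≤ i → i < j → pvG A i = pvG A (i + 1)) :
    ∃ k ns2 : Nat, descA A n fuel (j : Int) (ns : Int) = ((k : Int), (ns2 : Int)) ∧ j ≤ k ∧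
      k + 1 ≤ m ∧ (∀ i, j ≤ i → i < k → pvG A (i + 1) ≤ pvG A i) ∧
      (k + 1 < m → pvG A k < pvG A (k + 1)) ∧
      1 ≤ ns2 ∧ ns ≤ ns2 ∧ ns2 ≤ k ∧ pvG A ns2 < pvG A (ns2 - 1) ∧
      (∀ i, ns2 ≤ i → i < k → pvG A i = pvG A (i + 1)) := by
  induction fuel generalizing j ns with
  | zero =>
    exact ⟨j, ns, rfl, le_rfl, hj, fun i hi hik => by omega, fun hlt => by omega,
      hns1, le_rfl, hns2, hdrop, heq⟩
  | succ fuel ih =>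
    have hcast : ((j : Int) + 1) = ((j + 1 : Nat) : Int) := by push_cast; ring
    by_cases hc : j + 2 ≤ m ∧ pvG A (j + 1) ≤ pvG A j
    · have hcond : (j : Int) < n - 1 ∧
          PySem.List.pyGetD A ((j : Int) + 1) 0 ≤ PySem.List.pyGetD A (j : Int) 0 := by
        refine ⟨by omega, ?_⟩
        rw [hcast, pyGetD_nat, pyGetD_nat]
        exact hc.2
      rw [descA, if_pos hcond]
      by_cases hstrict : pvG A (j + 1) < pvG A j
      · rw [if_pos ⟨hcond.1, by rw [hcast, pyGetD_nat, pyGetD_nat]; exact hstrict⟩, hcast]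
        obtain ⟨k, ns2, hk, h1, h2, h3, h4, h5, h6, h7, h8, h9⟩ :=
          ih (j + 1) (j + 1) (by omega) (by omega) (by omega) le_rfl
            (by simpa using hstrict) (by omega)
        refine ⟨k, ns2, hk, by omega, h2, ?_, h4, h5, by omega, h7, h8, h9⟩
        intro i hi hik
        rcases Nat.eq_or_lt_of_le hi with hij | hij
        · subst hij; exact hc.2
        · exact h3 i (by omega) hik
      · rw [if_neg (by
          rintro ⟨_, hx⟩
          rw [hcast, pyGetD_nat, pyGetD_nat] at hx
          exact hstrict hx), hcast]
        have hjeq : pvG A j = pvG A (j + 1) := le_antisymm (by omega) hc.2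
        obtain ⟨k, ns2, hk, h1, h2, h3, h4, h5, h6, h7, h8, h9⟩ :=
          ih (j + 1) ns (by omega) (by omega) hns1 (by omega) hdrop
            (by
              intro i hi hik
              rcases Nat.eq_or_lt_of_le (by omega : i ≤ j) with hij | hij
              · subst hij; exact hjeq
              · exact heq i hi (by omega))
        refine ⟨k, ns2, hk, by omega, h2, ?_, h4, h5, h6, h7, h8, h9⟩
        intro i hi hik
        rcases Nat.eq_or_lt_of_le hi with hij | hij
        · subst hij; exact hc.2
        · exact h3 i (by omega) hik
    · have hcond : ¬ ((j : Int) < n - 1 ∧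
          PySem.List.pyGetD A ((j : Int) + 1) 0 ≤ PySem.List.pyGetD A (j : Int) 0) := by
        rintro ⟨hc1, hc2⟩
        rw [hcast, pyGetD_nat, pyGetD_nat] at hc2
        exact hc ⟨by omega, hc2⟩
      rw [descA, if_neg hcond]
      refine ⟨j, ns, rfl, le_rfl, hj, fun i hi hik => by omega, fun hjm => ?_, hns1, le_rfl,
        hns2, hdrop, heq⟩
      by_contra hx
      exact hc ⟨by omega, by omega⟩

theorem desc_top (A : List Int) (n : Int) (m : Nat) (hn : n = (m : Int)) (fuel j ns : Nat)
    (hj : j + 1 ≤ m) (hfuel : m - 1 - j ≤ fuel)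
    (hstrict : j + 1 < m → pvG A (j + 1) < pvG A j) :
    ∃ k ns2 : Nat, descA A n fuel (j : Int) (ns : Int) = ((k : Int), (ns2 : Int)) ∧ j ≤ k ∧
      k + 1 ≤ m ∧ (∀ i, j ≤ i → i < k → pvG A (i + 1) ≤ pvG A i) ∧
      (k + 1 < m → pvG A k < pvG A (k + 1)) ∧
      ((k = j ∧ ns2 = ns) ∨ (j + 1 ≤ ns2 ∧ ns2 ≤ k ∧ pvG A ns2 < pvG A (ns2 - 1) ∧
        (∀ i, ns2 ≤ i → i < k → pvG A i = pvG A (i + 1)))) := by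
  have hcast : ((j : Int) + 1) = ((j + 1 : Nat) : Int) := by push_cast; ring
  by_cases hc : j + 2 ≤ m
  · have hs := hstrict (by omega)
    obtain ⟨fuel', hf⟩ : ∃ fuel', fuel = fuel' + 1 := ⟨fuel - 1, by omega⟩
    subst hf
    have hcond : (j : Int) < n - 1 ∧
        PySem.List.pyGetD A ((j : Int) + 1) 0 ≤ PySem.List.pyGetD A (j : Int) 0 := by
      refine ⟨by omega, ?_⟩
      rw [hcast, pyGetD_nat, pyGetD_nat]
      omega
    rw [descA, if_pos hcond,
      if_pos ⟨hcond.1, by rw [hcast, pyGetD_nat, pyGetD_nat]; exact hs⟩, hcast]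
    obtain ⟨k, ns2, hk, h1, h2, h3, h4, h5, h6, h7, h8, h9⟩ :=
      desc_go A n m hn fuel' (j + 1) (j + 1) (by omega) (by omega) (by omega) le_rfl
        (by simpa using hs) (by omega)
    refine ⟨k, ns2, hk, by omega, h2, ?_, h4, Or.inr ⟨h6, h7, h8, h9⟩⟩
    intro i hi hik
    rcases Nat.eq_or_lt_of_le hi with hij | hij
    · subst hij; omega
    · exact h3 i (by omega) hik
  · match fuel with
    | 0 => exact ⟨j, ns, rfl, le_rfl, hj, fun i hi hik => by omega, fun hlt => by omega,
        Or.inl ⟨rfl, rfl⟩⟩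
    | fuel + 1 =>
      have hcond : ¬ ((j : Int) < n - 1 ∧
          PySem.List.pyGetD A ((j : Int) + 1) 0 ≤ PySem.List.pyGetD A (j : Int) 0) := by
        rintro ⟨hc1, _⟩
        omega
      rw [descA, if_neg hcond]
      exact ⟨j, ns, rfl, le_rfl, hj, fun i hi hik => by omega, fun hlt => by omega,
        Or.inl ⟨rfl, rfl⟩⟩

theorem outer_exit (A : List Int) (m : Nat) (j start : Nat) (maxLen : Int)
    (hjm : j + 1 = m)
    (hinc : incF A j = (j : Int) - (start : Int) + 1)
    (hml : (maxLen = bestUpTo A m j ∧ (j : Int) - (start : Int) + 1 ≤ maxLen) ∨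
      (j + 1 = m ∧ maxLen = bestUpTo A m m)) :
    maxLen = bestUpTo A m m := by
  rcases hml with ⟨hb, hge⟩ | ⟨_, hb⟩
  · have hdecj : decF A m j = 1 := by rw [decF, dif_neg (by omega)]
    have hpf : pvF A m j = (j : Int) - (start : Int) + 1 := by
      unfold pvF; rw [hinc, hdecj]; ring
    have hbm : bestUpTo A m m = max (bestUpTo A m j) (pvF A m j) := by
      rw [← hjm, best_succ]
    rw [hbm, hpf, hb]
    omega
  · exact hb

theorem outer_spec (A : List Int) (n : Int) (m : Nat) (hn : n = (m : Int)) (hm : 1 ≤ m)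
    (fuel j start : Nat) (maxLen : Int) (hsj : start ≤ j) (hjm : j + 1 ≤ m)
    (hfuel : m - 1 - j ≤ fuel)
    (hinc : incF A j = (j : Int) - (start : Int) + 1)
    (hdrop : start = 0 ∨ pvG A start < pvG A (start - 1))
    (hml : (maxLen = bestUpTo A m j ∧ (j : Int) - (start : Int) + 1 ≤ maxLen) ∨
      (j + 1 = m ∧ maxLen = bestUpTo A m m)) :
    outerA A n fuel (j : Int) (start : Int) (start : Int) maxLen = bestUpTo A m m := by
  induction fuel generalizing j start maxLen with
  | zero =>
    exact outer_exit A m j start maxLen (by omega) hinc hml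
  | succ fuel ih =>
    by_cases hc : j + 2 ≤ m
    · have hml1 : maxLen = bestUpTo A m j ∧ (j : Int) - (start : Int) + 1 ≤ maxLen := by
        rcases hml with h | h
        · exact h
        · omega
      have hnt : n.toNat = m := by omega
      obtain ⟨j1, hj1eq, hjj1, hj1m, hasc, hstop⟩ := asc_spec A n m hn m j hjm (by omega)
      have hascfull : ∀ i, start ≤ i → i < j1 → pvG A i ≤ pvG A (i + 1) := by
        intro i hi hik
        by_cases hij : i < j
        · exact incF_imp_asc A hinc hsj i hi hij
        · exact hasc i (by omega) hik
      have hincj1 : incF A j1 = (j1 : Int) - (start : Int) + 1 :=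
        incF_eq A hdrop hascfull (by omega)
      obtain ⟨k, ns2, hdesc_eq, hj1k, hkm, hdescsteps, hkstop, hdisj⟩ :=
        desc_top A n m hn m j1 start hj1m (by omega) hstop
      have hkstop' : k + 1 = m ∨ pvG A k < pvG A (k + 1) := by
        by_cases hx : k + 1 = m
        · exact Or.inl hx
        · exact Or.inr (hkstop (by omega))
      have hdec : decF A m j1 = (k : Int) - (j1 : Int) + 1 :=
        decF_eq A hj1k hkm hdescsteps hkstop'
      have hbound : ∀ i, j ≤ i → i < k → pvF A m i ≤ pvF A m j1 := by
        intro i hi hik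
        by_cases hij1 : i ≤ j1
        · rcases Nat.eq_or_lt_of_le hij1 with hij | hij
          · subst hij; exact le_rfl
          · have hinci : incF A i = (i : Int) - (start : Int) + 1 :=
              incF_eq A hdrop (fun t ht htk => hascfull t ht (by omega)) (by omega)
            have hre := runEnd_mono A m (by omega : i ≤ j1)
              (fun t ht htk => hasc t (by omega) htk)
            unfold pvF
            rw [hinci, hincj1]
            omega
        · have hdeci : decF A m i = (k : Int) - (i : Int) + 1 :=
            decF_eq A (by omega) hkm (fun t ht htk => hdescsteps t (by omega) htk) hkstop'
          have hisub : incF A i ≤ incF A j1 + ((i : Int) - (j1 : Int)) :=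
            incF_sub_le A (by omega)
          unfold pvF
          rw [hdeci, hdec]
          omega
      rw [outerA, if_pos (show (j : Int) < n - 1 by omega), hnt, hj1eq, hdesc_eq]
      have humax : max maxLen ((k : Int) - ((start : Int) - 1)) =
          max (bestUpTo A m j) (pvF A m j1) := by
        have h1 : (k : Int) - ((start : Int) - 1) = pvF A m j1 := by
          unfold pvF; rw [hincj1, hdec]; ring
        rw [h1, hml1.1]
      rcases hdisj with ⟨hkj, hns⟩ | ⟨hns2a, hns2k, hns2drop, hns2eq⟩
      · subst hkj
        have hkm1 : k + 1 = m := by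
          by_contra hx
          have h1 := hkstop (by omega)
          have h2 := hstop (by omega)
          omega
        subst hns
        have hbest : bestUpTo A m m = max (bestUpTo A m j) (pvF A m k) :=
          best_extend A m (pvF A m k) (by omega) (by omega) rfl
            (fun i hi hik => by
              rcases Nat.eq_or_lt_of_le (by omega : i ≤ k) with hik' | hik'
              · subst hik'; exact le_rfl
              · exact hbound i hi hik')
        rw [show ((k:Int), (ns2:Int)).1 = (k:Int) from rfl,
          show ((k:Int), (ns2:Int)).2 = (ns2:Int) from rfl]
        exact ih k ns2 _ (by omega) (by omega) (by omega) hincj1 hdrop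
          (Or.inr ⟨hkm1, by rw [humax, ← hbest]⟩)
      · have hj1k' : j1 < k := by omega
        have hinck : incF A k = (k : Int) - (ns2 : Int) + 1 :=
          incF_eq A (Or.inr hns2drop) (fun t ht htk => le_of_eq (hns2eq t ht htk)) (by omega)
        have hbest : bestUpTo A m k = max (bestUpTo A m j) (pvF A m j1) :=
          best_extend A m (pvF A m j1) (by omega) (by omega) rfl hbound
        rw [show ((k:Int), (ns2:Int)).1 = (k:Int) from rfl,
          show ((k:Int), (ns2:Int)).2 = (ns2:Int) from rfl]
        exact ih k ns2 _ (by omega) (by omega) (by omega) hinck (Or.inr hns2drop)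
          (Or.inl ⟨by rw [humax, ← hbest], by
            have : max maxLen ((k : Int) - ((start : Int) - 1)) ≥
                (k : Int) - ((start : Int) - 1) := le_max_right _ _
            omega⟩)
    · rw [outerA, if_neg (show ¬ ((j : Int) < n - 1) by omega)]
      exact outer_exit A m j start maxLen (by omega) hinc hml

theorem A_side (A : List Int) (n : Int) (m : Nat) (hn : n = (m : Int)) (hm : 1 ≤ m) :
    maxLenBitonic A n = bestUpTo A m m := by
  rw [maxLenBitonic, if_neg (by omega : ¬ n = 0), show n.toNat = m by omega]
  have h := outer_spec A n m hn hm m 0 0 1 le_rfl (by omega) (by omega) (by simp [incF])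
    (Or.inl rfl) (Or.inl ⟨by simp [bestUpTo], by simp⟩)
  simpa using h

theorem runs_go (xs : List Int) (k : Nat) (hk : k + 1 ≤ xs.length) :
    (PySem.List.pyRange 1 ((k : Int) + 1) 1).foldl
      (fun r i =>
        r ++ [if PySem.List.pyGetD xs (i - 1) 0 ≤ PySem.List.pyGetD xs i 0 then
                PySem.List.pyGetD r (-1) 0 + 1 else 1]) [1]
      = (List.range (k + 1)).map (incF xs) := by
  induction k with
  | zero =>
    rw [show ((0 : Nat) : Int) + 1 = 1 by norm_num, PySem.List.pyRange_one_eq_nil le_rfl]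
    simp [incF]
  | succ k ih =>
    rw [show ((k + 1 : Nat) : Int) + 1 = ((k : Int) + 1) + 1 by push_cast; ring,
      PySem.List.pyRange_one_succ_right (by omega : (1 : Int) ≤ (k : Int) + 1),
      List.foldl_append, ih (by omega)]
    simp only [List.foldl_cons, List.foldl_nil]
    rw [show (k : Int) + 1 - 1 = ((k : Nat) : Int) by ring,
      show (k : Int) + 1 = ((k + 1 : Nat) : Int) by push_cast; ring,
      pyGetD_nat, pyGetD_nat]
    conv_lhs => rw [show (List.range (k + 1)).map (incF xs) =
      (List.range k).map (incF xs) ++ [incF xs k] from by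
        rw [List.range_succ, List.map_append, List.map_singleton]]
    rw [PySem.List.pyGetD_neg_one_append_singleton, List.append_assoc]
    conv_rhs => rw [List.range_succ, List.map_append, List.map_singleton]
    conv_rhs => rw [List.range_succ, List.map_append, List.map_singleton]
    rw [List.append_assoc]
    simp only [incF]

theorem runsB_eq (xs : List Int) (h : 1 ≤ xs.length) :
    runsB xs = (List.range xs.length).map (incF xs) := by
  unfold runsB
  obtain ⟨k, hk⟩ : ∃ k, xs.length = k + 1 := ⟨xs.length - 1, by omega⟩
  rw [hk, show ((k + 1 : Nat) : Int) = (k : Int) + 1 by push_cast; ring]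
  exact runs_go xs k (by omega)

theorem pvG_rev (xs : List Int) (t : Nat) (h : t < xs.length) :
    pvG xs.reverse t = pvG xs (xs.length - 1 - t) := by
  unfold pvG
  rw [List.getD_eq_getElem?_getD, List.getD_eq_getElem?_getD, List.getElem?_reverse h]

theorem incF_rev (xs : List Int) (j : Nat) (hj : j < xs.length) :
    incF xs.reverse j = decF xs xs.length (xs.length - 1 - j) := by
  induction j with
  | zero =>
    rw [show incF xs.reverse 0 = 1 from rfl, decF, dif_neg (by omega)]
  | succ j ih =>
    rw [show incF xs.reverse (j + 1) =
      if pvG xs.reverse j ≤ pvG xs.reverse (j + 1) then incF xs.reverse j + 1 else 1 from rfl]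
    rw [pvG_rev xs j (by omega), pvG_rev xs (j + 1) hj, ih (by omega)]
    have hi1 : xs.length - 1 - j = (xs.length - 1 - (j + 1)) + 1 := by omega
    rw [hi1]
    by_cases hcc : pvG xs ((xs.length - 1 - (j + 1)) + 1) ≤ pvG xs (xs.length - 1 - (j + 1))
    · rw [if_pos hcc]
      conv_rhs => rw [decF, dif_pos ⟨by omega, hcc⟩]
    · rw [if_neg hcc]
      conv_rhs => rw [decF, dif_neg (by rintro ⟨_, hx⟩; exact hcc hx)]

theorem inc_getD (xs : List Int) (i : Nat) (h : i < xs.length) :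
    pvG (runsB xs) i = incF xs i := by
  unfold pvG
  rw [runsB_eq xs (by omega), List.getD_eq_getElem?_getD]
  rw [List.getElem?_map, List.getElem?_range h]
  rfl

theorem dec_getD (xs : List Int) (i : Nat) (h : i < xs.length) :
    pvG ((runsB xs.reverse).reverse) i = decF xs xs.length i := by
  unfold pvG
  rw [runsB_eq xs.reverse (by simp; omega), List.getD_eq_getElem?_getD]
  rw [List.getElem?_reverse (by simp; omega)]
  simp only [List.length_map, List.length_reverse, List.length_range]
  rw [List.getElem?_map, List.getElem?_range (by omega)]
  simp only [Option.map_some, Option.getD_some]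
  rw [incF_rev xs (xs.length - 1 - i) (by omega)]
  congr 1
  omega

theorem pvG_take (A : List Int) (m i : Nat) (him : i < m) : pvG (A.take m) i = pvG A i := by
  unfold pvG
  rw [List.getD_eq_getElem?_getD, List.getD_eq_getElem?_getD, List.getElem?_take_of_lt him]

theorem incF_congr (xs ys : List Int) (k : Nat) (h : ∀ i, i ≤ k → pvG xs i = pvG ys i) :
    incF xs k = incF ys k := by
  induction k with
  | zero => rfl
  | succ k ih =>
    rw [show incF xs (k + 1) = if pvG xs k ≤ pvG xs (k + 1) then incF xs k + 1 else 1 from rfl,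
      show incF ys (k + 1) = if pvG ys k ≤ pvG ys (k + 1) then incF ys k + 1 else 1 from rfl,
      h k (by omega), h (k + 1) le_rfl, ih (fun i hi => h i (by omega))]

theorem decF_congr (xs ys : List Int) (m j : Nat) (h : ∀ i, i < m → pvG xs i = pvG ys i) :
    decF xs m j = decF ys m j := by
  by_cases hc : j + 1 < m ∧ pvG xs (j + 1) ≤ pvG xs j
  · rw [decF, dif_pos hc, decF_congr xs ys m (j + 1) h]
    conv_rhs => rw [decF, dif_pos ⟨hc.1, by rw [← h (j + 1) hc.1, ← h j (by omega)]; exact hc.2⟩]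
  · rw [decF, dif_neg hc]
    conv_rhs => rw [decF, dif_neg (by
      rintro ⟨hc1, hc2⟩
      exact hc ⟨hc1, by rw [h (j + 1) hc1, h j (by omega)]; exact hc2⟩)]
termination_by m - j
decreasing_by all_goals omega

theorem B_side (A : List Int) (n : Int) (m : Nat) (hn : n = (m : Int)) (hm : 1 ≤ m)
    (hlen : m ≤ A.length) :
    maxLenBitonic_alt A n = bestUpTo A m m := by
  rw [maxLenBitonic_alt, if_neg (by omega : ¬ n = 0)]
  have hslice : PySem.List.slice A none (some n) = A.take m := by
    rw [PySem.List.slice_to A (by omega), hn]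
    simp
  have hxlen : (A.take m).length = m := by simp [hlen]
  rw [hslice, hn, PySem.List.pyRange_one, show ((m : Int) - 0).toNat = m by omega]
  rw [List.foldl_map]
  rw [PySem.List.foldl_congr_mem _ _
    (fun (b : Int) (i : Nat) => max b (pvF A m i)) 1
    (by
      intro acc i hi
      have him : i < m := by simpa using List.mem_range.mp hi
      rw [show (0 : Int) + (i : Nat) = ((i : Nat) : Int) by ring, pyGetD_nat, pyGetD_nat]
      have hd := dec_getD (A.take m) i (by omega)
      rw [hxlen] at hd
      rw [inc_getD (A.take m) i (by omega), hd,
        incF_congr (A.take m) A i (fun t ht => pvG_take A m t (by omega)),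
        decF_congr (A.take m) A m i (fun t ht => pvG_take A m t ht)]
      rfl)]
  rfl

theorem maxLenBitonic_main (A : List Int) (n : Int) (h0 : 0 < n) (hlen : n ≤ (A.length : Int)) :
    maxLenBitonic A n = maxLenBitonic_alt A n := by
  have hn : n = (n.toNat : Int) := (Int.toNat_of_nonneg (by omega)).symm
  rw [A_side A n n.toNat hn (by omega), B_side A n n.toNat hn (by omega) (by omega)]

-- ===== VERDICT (by name: the statement is the Claim_ definition above) =====
theorem maxLenBitonic_spec : Claim_equal_maxLenBitonic := by
  intro A n _ hpre
  unfold Spec_maxLenBitonic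
  by_cases h0 : n = 0
  · simp [maxLenBitonic, maxLenBitonic_alt, h0]
  · by_cases hneg : n < 0
    · -- both loops are empty: A returns 1, B's final fold runs over an empty range
      rw [maxLenBitonic, maxLenBitonic_alt, if_neg h0, if_neg h0,
        show n.toNat = 0 by omega, PySem.List.pyRange_one_eq_nil (by omega)]
      simp [outerA]
    · exact maxLenBitonic_main A n (by omega) hpre
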